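-- pv_equiv track=rewrite | github.com/mimi-kim-01/baekjoon-problem-solving | 1356.py | multisep
-- ===== SOURCE A (Python) =====
-- def multisep(N):
--     sep = 0
--     while sep != len(N) - 1:
--         left = 1; right = 1
--         for i in range(sep+1):
--             left *= N[i]
--         for j in range(sep+1, len(N)):
--             right *= N[j]
--         if left == right:
--             return 1
--         sep += 1
--     return 0
-- ===== SOURCE B (Python) =====
-- def multisep(N):
--     # suffix[i] = product of N[i:], built once; then a single left-to-right pass
--     suffix = [1]
--     for x in reversed(N):
--         suffix.append(x * suffix[-1])
--     suffix.reverse()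
--     left = 1
--     for i in range(len(N) - 1):
--         left *= N[i]
--         if left == suffix[i + 1]:
--             return 1
--     return 0
-- ===== Notes on version B (the rewrite author's own statement) =====
-- stated objective: faster
-- what changed: Precomputes all suffix products once and keeps a running left product, replacing A's recomputation of both products from scratch at every separator.
import Mathlib
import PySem

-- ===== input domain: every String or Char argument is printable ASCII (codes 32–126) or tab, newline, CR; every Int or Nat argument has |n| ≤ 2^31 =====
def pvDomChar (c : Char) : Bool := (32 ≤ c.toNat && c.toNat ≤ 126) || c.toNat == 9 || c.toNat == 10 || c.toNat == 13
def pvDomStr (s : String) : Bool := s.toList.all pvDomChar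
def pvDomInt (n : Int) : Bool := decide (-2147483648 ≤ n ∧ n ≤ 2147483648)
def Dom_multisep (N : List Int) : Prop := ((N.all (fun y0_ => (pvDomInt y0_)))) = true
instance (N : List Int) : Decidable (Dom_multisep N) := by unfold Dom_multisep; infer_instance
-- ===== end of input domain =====

-- B replaces A's quadratic recomputation of both side products at every separator by
-- precomputed suffix products and a running left product (single pass).

-- ===== PORT A =====
-- the while loop of A: sep counts up; fuel = number of iterations still possible
def multisepLoop (N : List Int) (sep : Nat) (fuel : Nat) : Int :=
  match fuel with
  | 0 => 0
  | fuel + 1 =>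
    if (sep : Int) = (N.length : Int) - 1 then 0
    else
      let left := (PySem.List.pyRange 0 ((sep : Int) + 1) 1).foldl
        (fun a i => a * PySem.List.pyGetD N i 0) 1
      let right := (PySem.List.pyRange ((sep : Int) + 1) (N.length : Int) 1).foldl
        (fun a j => a * PySem.List.pyGetD N j 0) 1
      if left = right then 1 else multisepLoop N (sep + 1) fuel

def multisep (N : List Int) : Int := multisepLoop N 0 N.length

-- ===== PORT B =====
-- suffix = [1]; for x in reversed(N): suffix.append(x * suffix[-1]); suffix.reverse()
def suffixes (N : List Int) : List Int :=
  (N.reverse.foldl (fun acc x => acc ++ [x * PySem.List.pyGetD acc (-1) 1]) [1]).reverse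

-- the for-loop of B: i runs over range(len(N) - 1)
def altGo (N suffix : List Int) (left : Int) (i : Nat) (fuel : Nat) : Int :=
  match fuel with
  | 0 => 0
  | fuel + 1 =>
    let left' := left * PySem.List.pyGetD N (i : Int) 0
    if left' = PySem.List.pyGetD suffix ((i : Int) + 1) 1 then 1
    else altGo N suffix left' (i + 1) fuel

def multisep_alt (N : List Int) : Int :=
  altGo N (suffixes N) 1 0 (N.length - 1)

-- ===== PRECONDITION & SPEC =====
-- Pre_ excludes only the empty list, on which A raises IndexError (N[0] inside its first loop).
def Pre_multisep (N : List Int) : Prop := N ≠ []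
instance (N : List Int) : Decidable (Pre_multisep N) := by unfold Pre_multisep; infer_instance
def pvWitness_multisep : List Int := ([2, 1, 2] : List Int)

def Spec_multisep (N : List Int) (out : Int) : Prop := out = multisep_alt N
instance (N : List Int) (out : Int) : Decidable (Spec_multisep N out) := by unfold Spec_multisep; infer_instance

-- ===== CLAIM (what is proved, stated in full; the proofs are below) =====
def Claim_equal_multisep : Prop := ∀ (N : List Int), Dom_multisep N → Pre_multisep N → Spec_multisep N (multisep N)

-- ===== LEMMAS AND PROOFS =====

-- the append-fold of B builds the running products of its input after the seed
theorem fold_suffix_spec : ∀ (M acc : List Int) (p : Int), acc ≠ [] → acc.getLast? = some p →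
    M.foldl (fun acc x => acc ++ [x * PySem.List.pyGetD acc (-1) 1]) acc
      = acc ++ (List.range M.length).map (fun j => p * (M.take (j + 1)).prod) := by
  intro M
  induction M with
  | nil => intro acc p _ _; simp
  | cons x xs ih =>
    intro acc p hne hlast
    have hget : PySem.List.pyGetD acc (-1) 1 = acc.getLast hne := PySem.List.pyGetD_neg_one acc 1 hne
    have hlast' : acc.getLast hne = p := by
      have := List.getLast?_eq_some_getLast (l := acc) hne
      rw [this] at hlast; exact Option.some_injective _ hlast
    simp only [List.foldl_cons, hget, hlast']
    rw [ih (acc ++ [x * p]) (x * p) (by simp) (by simp)]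
    rw [List.append_assoc]
    congr 1
    rw [List.length_cons, List.range_succ_eq_map]
    simp only [List.map_cons, List.map_map, List.singleton_append]
    congr 1
    · simp [mul_comm]
    · apply List.map_congr_left
      intro j _
      simp [Function.comp]
      ring

theorem suffixes_eq (N : List Int) :
    suffixes N = ([(1 : Int)] ++ (List.range N.length).map
      (fun j => (N.reverse.take (j + 1)).prod)).reverse := by
  unfold suffixes
  rw [fold_suffix_spec N.reverse [1] 1 (by simp) (by simp)]
  simp

theorem take_reverse_prod (N : List Int) (m : Nat) (hm : m ≤ N.length) :
    (N.reverse.take m).prod = (N.drop (N.length - m)).prod := by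
  rw [List.take_reverse, List.prod_reverse]

theorem suffixes_getD (N : List Int) (k : Nat) (hk : k ≤ N.length) :
    PySem.List.pyGetD (suffixes N) (k : Int) 1 = (N.drop k).prod := by
  rw [PySem.List.pyGetD_natCast, suffixes_eq]
  have hlen : (([(1 : Int)] ++ (List.range N.length).map
      (fun j => (N.reverse.take (j + 1)).prod))).length = N.length + 1 := by simp
  have hk' : k < (([(1 : Int)] ++ (List.range N.length).map
      (fun j => (N.reverse.take (j + 1)).prod))).reverse.length := by simp; omega
  rw [List.getD_eq_getElem _ _ hk', List.getElem_reverse]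
  rcases Nat.eq_or_lt_of_le hk with heq | hlt
  · subst heq
    simp
  · have h1 : (([(1 : Int)] ++ (List.range N.length).map
        (fun j => (N.reverse.take (j + 1)).prod))).length - 1 - k
        = (N.length - 1 - k) + 1 := by simp; omega
    simp only [h1]
    rw [List.getElem_append_right (by simp)]
    simp only [List.length_cons, List.length_nil, List.getElem_map, List.getElem_range]
    have h3 : N.length - 1 - k + 1 - 1 + 1 = N.length - k := by omega
    rw [h3, take_reverse_prod N (N.length - k) (by omega)]
    have h4 : N.length - (N.length - k) = k := by omega
    rw [h4]

theorem take_succ_prod (N : List Int) (m : Nat) (hm : m < N.length) :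
    (N.take (m + 1)).prod = (N.take m).prod * N.getD m 0 := by
  rw [List.take_succ, List.prod_append, List.getElem?_eq_getElem hm,
    List.getD_eq_getElem _ _ hm]
  simp

-- left product of A: fold over range(sep+1) is the product of the first sep+1 elements
theorem left_fold_eq (N : List Int) : ∀ (m : Nat), m ≤ N.length →
    (PySem.List.pyRange 0 (m : Int) 1).foldl (fun a i => a * PySem.List.pyGetD N i 0) 1
      = (N.take m).prod := by
  intro m hm
  rw [PySem.List.pyRange_zero_nat, List.foldl_map]
  simp only [PySem.List.pyGetD_natCast]
  induction m with
  | zero => simp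
  | succ m ih =>
    rw [List.range_succ, List.foldl_append, ih (by omega)]
    simp [take_succ_prod N m (by omega)]

-- right product of A: fold over range(sep+1, len) is the product of the rest
theorem right_fold_eq (N : List Int) (m : Nat) (hm : m ≤ N.length) :
    (PySem.List.pyRange (m : Int) (N.length : Int) 1).foldl
      (fun a j => a * PySem.List.pyGetD N j 0) 1 = (N.drop m).prod := by
  rw [PySem.List.foldl_pyRange_pyGetD' N 0 (fun a x => a * x) 1 (by positivity)]
  rw [Int.toNat_natCast, List.prod_eq_foldl]

theorem loops_agree (N : List Int) (hN : N ≠ []) : ∀ (fb sep fa : Nat) (left : Int),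
    fa = N.length - sep → fb = N.length - 1 - sep → sep ≤ N.length - 1 →
    left = (N.take sep).prod →
    multisepLoop N sep fa = altGo N (suffixes N) left sep fb := by
  have hn : 0 < N.length := List.length_pos_iff.mpr hN
  intro fb
  induction fb with
  | zero =>
    intro sep fa left hfa hfb hsep hleft
    have hfa' : fa = 1 := by omega
    subst hfa'
    simp only [multisepLoop, altGo]
    rw [if_pos (by push_cast; omega)]
  | succ f ih =>
    intro sep fa left hfa hfb hsep hleft
    have hlt : sep + 1 < N.length := by omega
    obtain ⟨fa', rfl⟩ : ∃ fa', fa = fa' + 1 := ⟨fa - 1, by omega⟩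
    simp only [multisepLoop, altGo]
    rw [if_neg (by push_cast; omega)]
    have hcast : (sep : Int) + 1 = ((sep + 1 : Nat) : Int) := by push_cast; ring
    have hL : (PySem.List.pyRange 0 ((sep : Int) + 1) 1).foldl
        (fun a i => a * PySem.List.pyGetD N i 0) 1 = (N.take (sep + 1)).prod := by
      rw [hcast]; exact left_fold_eq N (sep + 1) (by omega)
    have hR : (PySem.List.pyRange ((sep : Int) + 1) (N.length : Int) 1).foldl
        (fun a j => a * PySem.List.pyGetD N j 0) 1 = (N.drop (sep + 1)).prod := by
      rw [hcast]; exact right_fold_eq N (sep + 1) (by omega)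
    have hS : PySem.List.pyGetD (suffixes N) ((sep : Int) + 1) 1 = (N.drop (sep + 1)).prod := by
      rw [hcast]; exact suffixes_getD N (sep + 1) (by omega)
    have hL' : left * PySem.List.pyGetD N (sep : Int) 0 = (N.take (sep + 1)).prod := by
      rw [PySem.List.pyGetD_natCast, hleft, ← take_succ_prod N sep (by omega)]
    rw [hL, hR, hS, hL']
    split_ifs with h
    · rfl
    · exact ih (sep + 1) fa' ((N.take (sep + 1)).prod) (by omega) (by omega) (by omega) rfl

-- ===== VERDICT (by name: the statement is the Claim_ definition above) =====
theorem multisep_spec : Claim_equal_multisep := by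
  intro N _ hpre
  unfold Spec_multisep multisep multisep_alt
  have hlen : 0 < N.length := List.length_pos_iff.mpr hpre
  exact loops_agree N hpre (N.length - 1) 0 N.length 1 (by omega) (by omega) (by omega) (by simp)
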